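-- pv_equiv track=rewrite | github.com/AiZhanghan/Leetcode | 秋招/美团/3.1.py | func
-- ===== SOURCE A (Python) =====
-- def func(n, a):
--     """
--     Args:
--         n: int
--         a: list[int]
--     """
--     res = 0
--     for ai in a:
--         res ^= ai
--
--     for i in range(2, n + 1):
--         shan, yushu = divmod(n, i)
--         if shan % 2 == 0:
--             for j in range(1, yushu + 1):
--                 res ^= j
--         else:
--             for j in range(yushu + 1, i):
--                 res ^= j
--
--     return res
-- ===== SOURCE B (Python) =====
-- def func(n, a):
--     def px(k):
--         # XOR of 1..k (k >= 0), closed form by k mod 4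
--         return (k, 1, k + 1, 0)[k % 4]
--     res = 0
--     for ai in a:
--         res ^= ai
--     for i in range(2, n + 1):
--         q, r = divmod(n, i)
--         if q % 2 == 0:
--             res ^= px(r)              # XOR of 1..r
--         else:
--             res ^= px(i - 1) ^ px(r)  # XOR of r+1..i-1
--     return res
-- ===== Notes on version B (the rewrite author's own statement) =====
-- stated objective: faster
-- what changed: Each inner XOR-over-a-range loop is replaced by the closed-form prefix XOR f(k)=XOR(1..k) selected by k mod 4 (range XOR r+1..i-1 computed as f(i-1)^f(r)), so the divisor loop does O(1) work per i.
import Mathlib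
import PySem

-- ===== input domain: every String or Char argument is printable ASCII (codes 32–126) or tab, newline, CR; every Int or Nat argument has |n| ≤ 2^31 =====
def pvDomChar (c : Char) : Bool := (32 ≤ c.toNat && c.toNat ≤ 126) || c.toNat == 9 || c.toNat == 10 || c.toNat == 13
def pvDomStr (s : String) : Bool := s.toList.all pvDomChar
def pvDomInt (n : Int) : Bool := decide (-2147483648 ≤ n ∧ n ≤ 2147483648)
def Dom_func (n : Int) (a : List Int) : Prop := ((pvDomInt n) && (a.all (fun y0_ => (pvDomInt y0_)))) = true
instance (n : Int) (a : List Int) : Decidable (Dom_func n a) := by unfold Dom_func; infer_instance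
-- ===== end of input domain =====

-- B replaces each inner XOR-over-a-range loop by the closed-form prefix XOR (by k mod 4): O(n) instead of O(n^2) divisor work (objective: faster, measured).

-- ===== PORT A =====
-- divmod(n, i) is ported as floordiv/mod; i ranges over [2, n+1) so i ≠ 0 and this is exact.
def func (n : Int) (a : List Int) : Int :=
  let res := a.foldl (fun r ai => PySem.Int.bxor r ai) 0
  (PySem.List.pyRange 2 (n + 1) 1).foldl (fun res i =>
    let shan := PySem.Int.floordiv n i
    let yushu := PySem.Int.mod n i
    if PySem.Int.mod shan 2 = 0 then
      (PySem.List.pyRange 1 (yushu + 1) 1).foldl (fun r j => PySem.Int.bxor r j) res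
    else
      (PySem.List.pyRange (yushu + 1) i 1).foldl (fun r j => PySem.Int.bxor r j) res) res

-- ===== PORT B =====
-- px k = (k, 1, k+1, 0)[k % 4]; the index k % 4 lies in [0, 4), so this if-chain is the exact tuple indexing.
def pxB (k : Int) : Int :=
  let m := PySem.Int.mod k 4
  if m = 0 then k else if m = 1 then 1 else if m = 2 then k + 1 else 0

def func_alt (n : Int) (a : List Int) : Int :=
  let res := a.foldl (fun r ai => PySem.Int.bxor r ai) 0
  (PySem.List.pyRange 2 (n + 1) 1).foldl (fun res i =>
    let q := PySem.Int.floordiv n i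
    let r := PySem.Int.mod n i
    if PySem.Int.mod q 2 = 0 then
      PySem.Int.bxor res (pxB r)
    else
      PySem.Int.bxor res (PySem.Int.bxor (pxB (i - 1)) (pxB r))) res

-- ===== PRECONDITION & SPEC =====
def Spec_func (n : Int) (a : List Int) (out : Int) : Prop := out = func_alt n a
instance (n : Int) (a : List Int) (out : Int) : Decidable (Spec_func n a out) := by unfold Spec_func; infer_instance

-- ===== CLAIM (what is proved, stated in full; the proofs are below) =====
def Claim_equal_func : Prop := ∀ (n : Int) (a : List Int), Dom_func n a → Spec_func n a (func n a)

-- ===== LEMMAS AND PROOFS =====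

-- restricted associativity of Python xor: the two right arguments nonnegative, the accumulator arbitrary
theorem pv_bxor_assoc' (s x y : Int) (hx : 0 ≤ x) (hy : 0 ≤ y) :
    PySem.Int.bxor (PySem.Int.bxor s x) y = PySem.Int.bxor s (PySem.Int.bxor x y) := by
  rcases le_or_gt 0 s with hs | hs
  · rw [PySem.Int.bxor_of_nonneg hs hx, PySem.Int.bxor_of_nonneg hx hy,
      PySem.Int.bxor_of_nonneg (by positivity) hy, PySem.Int.bxor_of_nonneg hs (by positivity)]
    simp [Nat.xor_assoc]
  · have h1 : ¬ (0 ≤ s) := by omega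
    simp only [PySem.Int.bxor, if_pos hx, if_pos hy, if_neg h1]
    have h2 : ¬ (0 ≤ -(((( -s - 1).toNat ^^^ x.toNat : Nat) : Int)) - 1) := by
      have : (0:Int) ≤ ((( -s - 1).toNat ^^^ x.toNat : Nat) : Int) := Int.natCast_nonneg _
      omega
    have h3 : (0:Int) ≤ ((x.toNat ^^^ y.toNat : Nat) : Int) := Int.natCast_nonneg _
    simp only [if_neg h2, if_pos h3]
    have h4 : (-(-(((( -s - 1).toNat ^^^ x.toNat : Nat) : Int)) - 1) - 1).toNat
        = (( -s - 1).toNat ^^^ x.toNat) := by omega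
    rw [h4]
    have h5 : (((x.toNat ^^^ y.toNat : Nat) : Int)).toNat = x.toNat ^^^ y.toNat := by omega
    rw [h5, Nat.xor_assoc]

theorem pv_bxor_zero_left (x : Int) : PySem.Int.bxor 0 x = x := by
  rw [PySem.Int.bxor_comm]; exact PySem.Int.bxor_zero x

-- a fold of xor over nonnegative elements stays nonnegative when started at 0
theorem pv_fold_nonneg (l : List Int) (h : ∀ j ∈ l, 0 ≤ j) (s : Int) (hs : 0 ≤ s) :
    0 ≤ l.foldl (fun r j => PySem.Int.bxor r j) s := by
  induction l generalizing s with
  | nil => simpa using hs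
  | cons x t ih =>
    have hx : 0 ≤ x := h x (List.mem_cons_self ..)
    have : 0 ≤ PySem.Int.bxor s x := by
      rw [PySem.Int.bxor_of_nonneg hs hx]; exact Int.natCast_nonneg _
    exact ih (fun j hj => h j (List.mem_cons_of_mem _ hj)) _ this

-- factor the initial accumulator out of a xor fold over nonnegative elements
theorem pv_fold_factor (l : List Int) (h : ∀ j ∈ l, 0 ≤ j) (s : Int) :
    l.foldl (fun r j => PySem.Int.bxor r j) s
      = PySem.Int.bxor s (l.foldl (fun r j => PySem.Int.bxor r j) 0) := by
  induction l generalizing s with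
  | nil => simp [PySem.Int.bxor_zero]
  | cons x t ih =>
    have hx : 0 ≤ x := h x (List.mem_cons_self ..)
    have ht : ∀ j ∈ t, 0 ≤ j := fun j hj => h j (List.mem_cons_of_mem _ hj)
    have hT : 0 ≤ t.foldl (fun r j => PySem.Int.bxor r j) 0 := pv_fold_nonneg t ht 0 le_rfl
    simp only [List.foldl_cons]
    rw [ih ht (PySem.Int.bxor s x), pv_bxor_zero_left, ih ht x,
      pv_bxor_assoc' s x _ hx hT]

theorem pv_even_xor_one (b : Nat) : (2 * b) ^^^ 1 = 2 * b + 1 := by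
  apply Nat.eq_of_testBit_eq
  intro i
  cases i with
  | zero => simp
  | succ i => simp [Nat.testBit_succ, Nat.mul_add_div]

theorem pv_xor_cancel_left (a b : Nat) : a ^^^ (a ^^^ b) = b := by
  rw [← Nat.xor_assoc, Nat.xor_self, Nat.zero_xor]

-- pxB on a natural-number cast, by the residue mod 4
theorem pv_pxB_natCast (m : Nat) :
    pxB (m : Int) = if m % 4 = 0 then (m : Int) else if m % 4 = 1 then 1
      else if m % 4 = 2 then (m : Int) + 1 else 0 := by
  have hm : PySem.Int.mod (m : Int) 4 = ((m % 4 : Nat) : Int) := by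
    exact_mod_cast PySem.Int.mod_natCast m 4
  have h4 : m % 4 = 0 ∨ m % 4 = 1 ∨ m % 4 = 2 ∨ m % 4 = 3 := by omega
  simp only [pxB, hm]
  rcases h4 with h | h | h | h <;> rw [h] <;> norm_num

-- one step of the prefix-xor recurrence
theorem pv_step (m : Nat) :
    PySem.Int.bxor (pxB (m : Int)) ((m : Int) + 1) = pxB ((m : Int) + 1) := by
  rw [show ((m : Int) + 1) = ((m + 1 : Nat) : Int) by push_cast; ring]
  obtain ⟨t, s, hs, rfl⟩ : ∃ t s, s < 4 ∧ m = 4 * t + s :=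
    ⟨m / 4, m % 4, Nat.mod_lt _ (by norm_num), (Nat.div_add_mod m 4).symm⟩
  rw [pv_pxB_natCast, pv_pxB_natCast]
  interval_cases s
  · simp only [show (4 * t + 0) % 4 = 0 from by omega,
      show (4 * t + 0 + 1) % 4 = 1 from by omega]
    norm_num
    have h1 : (4 * t) ^^^ (4 * t + 1) = 1 := by
      have he := pv_even_xor_one (2 * t)
      rw [show 2 * (2 * t) = 4 * t by ring] at he
      rw [← he, pv_xor_cancel_left]
    rw [show (4 * (t : Int)) = ((4 * t : Nat) : Int) from by push_cast; ring,
      show ((4 * t : Nat) : Int) + 1 = ((4 * t + 1 : Nat) : Int) from by push_cast; ring,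
      PySem.Int.bxor_natCast, h1]
    norm_num
  · simp only [show (4 * t + 1) % 4 = 1 from by omega,
      show (4 * t + 1 + 1) % 4 = 2 from by omega]
    norm_num
    have h1 : 1 ^^^ (4 * t + 2) = 4 * t + 3 := by
      rw [Nat.xor_comm]
      have he := pv_even_xor_one (2 * t + 1)
      rw [show 2 * (2 * t + 1) = 4 * t + 2 by ring] at he
      rw [he]
    rw [show (4 * (t : Int) + 1 + 1) = ((4 * t + 2 : Nat) : Int) from by push_cast; ring,
      show (1 : Int) = ((1 : Nat) : Int) from by norm_num,
      PySem.Int.bxor_natCast, h1]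
    omega
  · simp only [show (4 * t + 2) % 4 = 2 from by omega,
      show (4 * t + 2 + 1) % 4 = 3 from by omega]
    norm_num
  · simp only [show (4 * t + 3) % 4 = 3 from by omega,
      show (4 * t + 3 + 1) % 4 = 0 from by omega]
    norm_num
    exact pv_bxor_zero_left _

-- the closed form: xor of 1..m equals pxB m
theorem pv_prefix_xor (m : Nat) :
    (PySem.List.pyRange 1 ((m : Int) + 1) 1).foldl (fun r j => PySem.Int.bxor r j) 0
      = pxB (m : Int) := by
  induction m with
  | zero =>
    rw [show ((0 : Nat) : Int) + 1 = 1 by norm_num, PySem.List.pyRange_one_eq_nil le_rfl]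
    decide
  | succ m ih =>
    rw [show ((m + 1 : Nat) : Int) = (m : Int) + 1 by push_cast; ring,
      PySem.List.pyRange_one_succ_right (by omega : (1 : Int) ≤ (m : Int) + 1),
      List.foldl_append, ih]
    simp only [List.foldl_cons, List.foldl_nil]
    exact pv_step m

-- cancellation for nonnegative arguments
theorem pv_bxor_cancel (a b : Int) (ha : 0 ≤ a) (hb : 0 ≤ b) :
    PySem.Int.bxor a (PySem.Int.bxor a b) = b := by
  rw [PySem.Int.bxor_of_nonneg ha hb, PySem.Int.bxor_of_nonneg ha (Int.natCast_nonneg _)]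
  have h1 : (((a.toNat ^^^ b.toNat : Nat) : Int)).toNat = a.toNat ^^^ b.toNat := by omega
  rw [h1, pv_xor_cancel_left]
  omega

theorem pv_pyRange_one_nonneg (a b : Int) (ha : 1 ≤ a) :
    ∀ j ∈ PySem.List.pyRange a b 1, 0 ≤ j := by
  intro j hj
  have := (PySem.List.mem_pyRange_one).mp hj
  omega

-- the prefix-xor closed form, stated for a nonnegative Int bound
theorem pv_prefix_xor_int (r : Int) (hr : 0 ≤ r) :
    (PySem.List.pyRange 1 (r + 1) 1).foldl (fun r j => PySem.Int.bxor r j) 0 = pxB r := by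
  have := pv_prefix_xor r.toNat
  rwa [Int.toNat_of_nonneg hr] at this

theorem pv_pxB_nonneg (r : Int) (hr : 0 ≤ r) : 0 ≤ pxB r := by
  rw [← pv_prefix_xor_int r hr]
  exact pv_fold_nonneg _ (pv_pyRange_one_nonneg _ _ le_rfl) 0 le_rfl

-- xor of the range r+1..i-1, for 0 ≤ r < i, equals pxB (i-1) ^ pxB r
theorem pv_range_xor (r i : Int) (hr : 0 ≤ r) (hri : r < i) :
    (PySem.List.pyRange (r + 1) i 1).foldl (fun r j => PySem.Int.bxor r j) 0
      = PySem.Int.bxor (pxB (i - 1)) (pxB r) := by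
  have hsplit : PySem.List.pyRange 1 i 1
      = PySem.List.pyRange 1 (r + 1) 1 ++ PySem.List.pyRange (r + 1) i 1 :=
    PySem.List.pyRange_one_append 1 (r + 1) i (by omega) (by omega)
  have hXi : (PySem.List.pyRange 1 i 1).foldl (fun r j => PySem.Int.bxor r j) 0 = pxB (i - 1) := by
    have := pv_prefix_xor_int (i - 1) (by omega)
    rwa [show i - 1 + 1 = i by ring] at this
  have hY : pxB (i - 1) = PySem.Int.bxor (pxB r)
      ((PySem.List.pyRange (r + 1) i 1).foldl (fun r j => PySem.Int.bxor r j) 0) := by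
    rw [← hXi, hsplit, List.foldl_append, pv_prefix_xor_int r hr,
      pv_fold_factor _ (pv_pyRange_one_nonneg _ _ (by omega)) (pxB r)]
  have hYnn : 0 ≤ (PySem.List.pyRange (r + 1) i 1).foldl (fun r j => PySem.Int.bxor r j) 0 :=
    pv_fold_nonneg _ (pv_pyRange_one_nonneg _ _ (by omega)) 0 le_rfl
  calc (PySem.List.pyRange (r + 1) i 1).foldl (fun r j => PySem.Int.bxor r j) 0
      = PySem.Int.bxor (pxB r) (PySem.Int.bxor (pxB r)
          ((PySem.List.pyRange (r + 1) i 1).foldl (fun r j => PySem.Int.bxor r j) 0)) :=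
        (pv_bxor_cancel _ _ (pv_pxB_nonneg r hr) hYnn).symm
    _ = PySem.Int.bxor (pxB r) (pxB (i - 1)) := by rw [← hY]
    _ = PySem.Int.bxor (pxB (i - 1)) (pxB r) := PySem.Int.bxor_comm _ _

-- ===== VERDICT (by name: the statement is the Claim_ definition above) =====
theorem func_spec : Claim_equal_func := by
  intro n a _
  unfold Spec_func func func_alt
  simp only []
  apply PySem.List.foldl_congr_mem
  intro acc i hi
  have hmem := (PySem.List.mem_pyRange_one).mp hi
  have hipos : 0 < i := by omega
  have hr0 : 0 ≤ PySem.Int.mod n i := PySem.Int.mod_nonneg n hipos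
  have hri : PySem.Int.mod n i < i := PySem.Int.mod_lt n hipos
  by_cases hq : PySem.Int.mod (PySem.Int.floordiv n i) 2 = 0
  · simp only [if_pos hq]
    rw [pv_fold_factor _ (pv_pyRange_one_nonneg _ _ le_rfl) acc,
      pv_prefix_xor_int _ hr0]
  · simp only [if_neg hq]
    rw [pv_fold_factor _ (pv_pyRange_one_nonneg _ _ (by omega)) acc,
      pv_range_xor _ _ hr0 hri]
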